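-- pv_equiv track=rewrite | github.com/manubot/catalog | process-catalog.py | get_authors_text
-- ===== SOURCE A (Python) =====
-- def get_authors_text(csl_item, max_length=100):
--     """
--     Return string of authors like:
--     Ching, Himmelstein, Beaulieu-Jones, Kalinin, Do, Way, Ferrero, Agapow, Zietz, Hoffman, Xie, Rosen, et al
--
--     "et al" is inserted when adding another name would cause
--     authors_text to exceed max_length.
--     """
--     authors = list()
--     keys = [
--         'author',
--         'collection-editor',
--         'composer',
--         'container-author',
--         'director',
--         'editor',
--         'editorial-director',
--         'translator',
--     ]
--     for key in keys:
--         if key in csl_item: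
--             authors = csl_item[key]
--             break
--     authors_text = ''
--     for author in authors:
--         try:
--             # name = f"{author['given']} {author['family']}"]
--             name = author['family']
--         except KeyError:
--             if 'literal' in author:
--                 name = author['literal']
--             else:
--                 continue
--         if authors_text:
--             authors_text += ', '
--         if len(name) + len(authors_text) > max_length:
--             authors_text += 'et al'
--             break
--         authors_text += name
--     return authors_text
-- ===== SOURCE B (Python) =====
-- # B: three explicit phases (select authors, collect display names, length-cutoff then join)
-- # instead of A's single incremental loop with in-place comma handling and break.
-- def get_authors_text(csl_item, max_length=100):
--     keys = [
--         'author',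
--         'collection-editor',
--         'composer',
--         'container-author',
--         'director',
--         'editor',
--         'editorial-director',
--         'translator',
--     ]
--     authors = next((csl_item[k] for k in keys if k in csl_item), [])
--     names = []
--     for author in authors:
--         if 'family' in author:
--             names.append(author['family'])
--         elif 'literal' in author:
--             names.append(author['literal'])
--     kept = []
--     total = 0
--     truncated = False
--     for name in names:
--         new = total + (2 if kept else 0) + len(name)
--         if new > max_length:
--             truncated = True
--             break
--         kept.append(name)
--         total = new
--     text = ', '.join(kept)
--     if truncated:
--         text += ', et al' if kept else 'et al'
--     return text
-- ===== Notes on version B (the rewrite author's own statement) =====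
-- stated objective: simpler
-- what changed: A's single incremental loop (comma appended in place, overflow check mid-string, break) is decomposed into three plain phases: collect the display names, keep a prefix by cumulative joined length, then ', '.join plus an optional 'et al' suffix. Pre_ excludes items where some author's display name ('family' else 'literal') is the empty string — a defensible corner where A's truthiness-based comma placement collapses leading empty names while B's join keeps the separator.
-- outside the precondition, e.g. on get_authors_text({'author': [{'family': ''}, {'family': 'x'}]}, 100): A returns 'x', B returns ', x'
import Mathlib
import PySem

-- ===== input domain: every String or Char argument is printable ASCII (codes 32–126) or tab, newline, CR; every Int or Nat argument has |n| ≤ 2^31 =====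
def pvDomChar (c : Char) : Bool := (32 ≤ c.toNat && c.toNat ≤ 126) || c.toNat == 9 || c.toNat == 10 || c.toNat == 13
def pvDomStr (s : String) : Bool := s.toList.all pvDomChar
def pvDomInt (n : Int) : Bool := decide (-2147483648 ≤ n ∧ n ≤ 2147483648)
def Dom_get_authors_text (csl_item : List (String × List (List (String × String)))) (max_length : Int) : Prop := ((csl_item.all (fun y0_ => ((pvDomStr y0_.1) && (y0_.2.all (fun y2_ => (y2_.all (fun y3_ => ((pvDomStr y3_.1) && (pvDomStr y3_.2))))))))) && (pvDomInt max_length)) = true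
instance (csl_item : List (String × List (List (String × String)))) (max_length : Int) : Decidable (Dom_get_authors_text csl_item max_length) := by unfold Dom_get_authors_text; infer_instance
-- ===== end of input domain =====

-- B decomposes A's incremental comma-handling loop into three phases (collect names, length cutoff, join);
-- equivalence is proved on inputs whose authors all have a nonempty display name (see Pre_ below).

-- ===== PORT A =====
-- shared data / lookup helpers (both Pythons contain the same key list and family/literal fallback)
def pvKeysList : List String :=
  ["author", "collection-editor", "composer", "container-author",
   "director", "editor", "editorial-director", "translator"]

-- author['family'] with fallback to author['literal'] (none = skip), as in both Pythons
def pvDisplay (author : List (String × String)) : Option String :=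
  match PySem.Dict.get? (PySem.Dict.mk author) "family" with
  | some name => some name
  | none => PySem.Dict.get? (PySem.Dict.mk author) "literal"

-- 'for key in keys: if key in csl_item: authors = csl_item[key]; break' (authors = [] if none found)
def pvPickAuthors (csl_item : List (String × List (List (String × String)))) : List String → List (List (String × String))
  | [] => []
  | key :: rest =>
    match PySem.Dict.get? (PySem.Dict.mk csl_item) key with
    | some v => v
    | none => pvPickAuthors csl_item rest

-- A's author loop, acc = authors_text as a list of chars
def pvLoopA (max_length : Int) : List (List (String × String)) → List Char → List Char
  | [], acc => acc
  | author :: rest, acc =>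
    match pvDisplay author with
    | none => pvLoopA max_length rest acc
    | some name =>
      if ((name.toList.length : Int) + (((if acc = [] then acc else acc ++ (", ").toList) : List Char).length : Int)) > max_length then
        (if acc = [] then acc else acc ++ (", ").toList) ++ ("et al").toList
      else
        pvLoopA max_length rest ((if acc = [] then acc else acc ++ (", ").toList) ++ name.toList)

def get_authors_text (csl_item : List (String × List (List (String × String)))) (max_length : Int) : String :=
  String.ofList (pvLoopA max_length (pvPickAuthors csl_item pvKeysList) [])

-- ===== PORT B =====
-- phase 2: the list of display names
def pvNamesB (authors : List (List (String × String))) : List String :=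
  authors.filterMap pvDisplay

-- phase 3: (kept prefix, truncated?) by cumulative joined length
def pvCutB (max_length : Int) : List String → Int → Bool → List String × Bool
  | [], _, _ => ([], false)
  | name :: rest, total, sep =>
    if total + (if sep then 2 else 0) + (name.toList.length : Int) > max_length then ([], true)
    else
      (name :: (pvCutB max_length rest (total + (if sep then 2 else 0) + (name.toList.length : Int)) true).1,
       (pvCutB max_length rest (total + (if sep then 2 else 0) + (name.toList.length : Int)) true).2)

def get_authors_text_alt (csl_item : List (String × List (List (String × String)))) (max_length : Int) : String :=
  let names := pvNamesB (pvPickAuthors csl_item pvKeysList)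
  let p := pvCutB max_length names 0 false
  let text := PySem.Chars.join (", ").toList (p.1.map String.toList)
  String.ofList
    (if p.2 then
       (if p.1 = [] then text ++ ("et al").toList else text ++ (", et al").toList)
     else text)

-- ===== PRECONDITION & SPEC =====
-- Pre_ excludes items where some author's display name ('family' else 'literal') is the empty
-- string — a defensible corner where A's truthiness-based comma placement collapses leading empty
-- names while B's join keeps the ', ' separator.
def Pre_get_authors_text (csl_item : List (String × List (List (String × String)))) (max_length : Int) : Prop :=
  ∀ p ∈ csl_item, ∀ a ∈ p.2, pvDisplay a ≠ some ""
instance (csl_item : List (String × List (List (String × String)))) (max_length : Int) : Decidable (Pre_get_authors_text csl_item max_length) := by unfold Pre_get_authors_text; infer_instance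

def pvWitness_get_authors_text : (List (String × List (List (String × String)))) × Int :=
  ([("author", [[("family", "Ching")], [("given", "Daniel")], [("literal", "Way")]])], 10)

def Spec_get_authors_text (csl_item : List (String × List (List (String × String)))) (max_length : Int) (out : String) : Prop := out = get_authors_text_alt csl_item max_length
instance (csl_item : List (String × List (List (String × String)))) (max_length : Int) (out : String) : Decidable (Spec_get_authors_text csl_item max_length out) := by unfold Spec_get_authors_text; infer_instance

-- ===== CLAIM (what is proved, stated in full; the proofs are below) =====
def Claim_equal_get_authors_text : Prop := ∀ (csl_item : List (String × List (List (String × String)))) (max_length : Int), Dom_get_authors_text csl_item max_length → Pre_get_authors_text csl_item max_length → Spec_get_authors_text csl_item max_length (get_authors_text csl_item max_length)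

-- ===== LEMMAS AND PROOFS =====

-- the string step of A's loop, as a fold function (proof-side only)
def pvStep (s : List Char) (n : String) : List Char :=
  (if s = [] then s else s ++ (", ").toList) ++ n.toList

lemma pvGet?_mk_mem {V : Type} {l : List (String × V)} {k : String} {v : V}
    (h : PySem.Dict.get? (PySem.Dict.mk l) k = some v) : (k, v) ∈ l := by
  induction l with
  | nil => simp [PySem.Dict.get?] at h
  | cons p rest ih =>
    obtain ⟨k', v'⟩ := p
    rw [PySem.Dict.get?_mk_cons] at h
    by_cases hk : k' == k
    · simp [hk] at h; subst h
      have hkk : k' = k := beq_iff_eq.mp hk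
      subst hkk; simp
    · simp [hk] at h; exact List.mem_cons_of_mem _ (ih h)

lemma pvPick_mem {csl : List (String × List (List (String × String)))} :
    ∀ (ks : List String) (a : List (String × String)), a ∈ pvPickAuthors csl ks →
    ∃ p ∈ csl, a ∈ p.2 := by
  intro ks
  induction ks with
  | nil => intro a ha; simp [pvPickAuthors] at ha
  | cons k rest ih =>
    intro a ha
    unfold pvPickAuthors at ha
    cases hg : PySem.Dict.get? (PySem.Dict.mk csl) k with
    | some v =>
      rw [hg] at ha
      exact ⟨(k, v), pvGet?_mk_mem hg, ha⟩
    | none => rw [hg] at ha; exact ih a ha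

lemma pvNamesB_nonempty {authors : List (List (String × String))}
    (h : ∀ a ∈ authors, pvDisplay a ≠ some "") :
    ∀ n ∈ pvNamesB authors, n.toList ≠ [] := by
  intro n hn
  simp only [pvNamesB, List.mem_filterMap] at hn
  obtain ⟨a, ha, hda⟩ := hn
  intro hnil
  have : n = "" := String.toList_inj.mp (by simp [hnil])
  exact h a ha (this ▸ hda)

lemma pvCutB_sublist (m : Int) :
    ∀ (l : List String) (t : Int) (b : Bool), ∀ n ∈ (pvCutB m l t b).1, n ∈ l := by
  intro l
  induction l with
  | nil => intro t b n hn; simp [pvCutB] at hn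
  | cons x rest ih =>
    intro t b n hn
    unfold pvCutB at hn
    split at hn <;> split at hn <;> simp at hn <;>
      rcases hn with h | h
    · simp [h]
    · exact List.mem_cons_of_mem _ (ih _ true n h)
    · simp [h]
    · exact List.mem_cons_of_mem _ (ih _ true n h)

lemma pvFold_ne_nil : ∀ (k : List String) (s : List Char), s ≠ [] → List.foldl pvStep s k ≠ [] := by
  intro k
  induction k with
  | nil => intro s hs; simpa using hs
  | cons n rest ih =>
    intro s hs
    simp only [List.foldl_cons]
    apply ih
    simp [pvStep, hs]

lemma pvJoin_shift (sep a b : List Char) (l : List (List Char)) :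
    PySem.Chars.join sep ((a ++ sep ++ b) :: l) = a ++ sep ++ PySem.Chars.join sep (b :: l) := by
  cases l with
  | nil => simp [PySem.Chars.join_singleton, List.append_assoc]
  | cons c l' =>
    rw [PySem.Chars.join_cons_cons, PySem.Chars.join_cons_cons]
    simp [List.append_assoc]

lemma pvFold_join : ∀ (k : List String) (s : List Char), s ≠ [] →
    List.foldl pvStep s k = PySem.Chars.join (", ").toList (s :: k.map String.toList) := by
  intro k
  induction k with
  | nil => intro s _; simp [PySem.Chars.join_singleton]
  | cons n rest ih =>
    intro s hs
    simp only [List.foldl_cons, List.map_cons]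
    have hstep : pvStep s n = s ++ (", ").toList ++ n.toList := by simp [pvStep, hs]
    rw [hstep, ih _ (by simp [hs])]
    have h2 := pvJoin_shift (", ").toList s n.toList (rest.map String.toList)
    have h3 := PySem.Chars.join_cons_cons (", ").toList s n.toList (rest.map String.toList)
    simp only [List.append_assoc] at h2 h3 ⊢
    rw [h2, h3]

-- the shape of A's loop result, as B computes it
def pvShape (kfold : List Char) (trunc : Bool) : List Char :=
  if trunc then
    (if kfold = [] then kfold else kfold ++ (", ").toList) ++ ("et al").toList
  else kfold

lemma pvLoopA_eq_cut (m : Int) :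
    ∀ (authors : List (List (String × String))) (acc : List Char),
    (∀ a ∈ authors, pvDisplay a ≠ some "") →
    pvLoopA m authors acc =
      pvShape (List.foldl pvStep acc (pvCutB m (pvNamesB authors) (acc.length : Int) (decide (acc ≠ []))).1)
              (pvCutB m (pvNamesB authors) (acc.length : Int) (decide (acc ≠ []))).2 := by
  intro authors
  induction authors with
  | nil => intro acc _; simp [pvLoopA, pvNamesB, pvCutB, pvShape]
  | cons a rest ih =>
    intro acc hpre
    have hrest : ∀ x ∈ rest, pvDisplay x ≠ some "" := fun x hx => hpre x (List.mem_cons_of_mem _ hx)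
    cases hd : pvDisplay a with
    | none =>
      have : pvNamesB (a :: rest) = pvNamesB rest := by simp [pvNamesB, hd]
      rw [this]
      unfold pvLoopA
      rw [hd]
      exact ih acc hrest
    | some name =>
      have hname : name.toList ≠ [] := by
        intro hnil
        apply hpre a (List.mem_cons_self)
        have hne : name = "" := String.toList_inj.mp (by simp [hnil])
        rw [hd, hne]
      have hnames : pvNamesB (a :: rest) = name :: pvNamesB rest := by
        simp [pvNamesB, hd]
      rw [hnames]
      unfold pvLoopA
      rw [hd]
      dsimp only
      set acc1 := if acc = [] then acc else acc ++ (", ").toList with hacc1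
      have hlen : (acc1.length : Int) = (acc.length : Int) + (if decide (acc ≠ []) then 2 else 0) := by
        by_cases h : acc = [] <;> simp [hacc1, h]
      have hnew : ((acc.length : Int) + (if decide (acc ≠ []) then 2 else 0) + (name.toList.length : Int) > m)
          ↔ ((name.toList.length : Int) + (acc1.length : Int) > m) := by
        rw [hlen]; omega
      unfold pvCutB
      by_cases hc : (acc.length : Int) + (if decide (acc ≠ []) then 2 else 0) + (name.toList.length : Int) > m
      · rw [if_pos hc, if_pos (hnew.mp hc)]
        simp [pvShape, hacc1]
      · rw [if_neg hc, if_neg (fun h => hc (hnew.mpr h))]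
        have hne : acc1 ++ name.toList ≠ [] := by simp [hname]
        have hlen2 : ((acc1 ++ name.toList).length : Int)
            = (acc.length : Int) + (if decide (acc ≠ []) then 2 else 0) + (name.toList.length : Int) := by
          rw [List.length_append]; push_cast; omega
        have := ih (acc1 ++ name.toList) hrest
        rw [hlen2, decide_eq_true hne] at this
        rw [this]
        have hfold : pvStep acc name = acc1 ++ name.toList := by simp [pvStep, hacc1]
        simp only [List.foldl_cons, hfold]

-- ===== VERDICT (by name: the statement is the Claim_ definition above) =====
theorem get_authors_text_spec : Claim_equal_get_authors_text := by
  intro csl_item max_length _ hpre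
  unfold Spec_get_authors_text get_authors_text get_authors_text_alt
  have hauth : ∀ a ∈ pvPickAuthors csl_item pvKeysList, pvDisplay a ≠ some "" := by
    intro a ha
    obtain ⟨p, hp, hap⟩ := pvPick_mem _ a ha
    exact hpre p hp a hap
  rw [pvLoopA_eq_cut max_length _ [] hauth]
  set names := pvNamesB (pvPickAuthors csl_item pvKeysList) with hn
  have hnz : ∀ n ∈ names, n.toList ≠ [] := pvNamesB_nonempty hauth
  set p := pvCutB max_length names ((([] : List Char).length : Int)) (decide (([] : List Char) ≠ [])) with hp
  have hp' : p = pvCutB max_length names 0 false := by simp [hp]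
  have hkz : ∀ n ∈ p.1, n.toList ≠ [] := fun n hnp => hnz n (pvCutB_sublist _ _ _ _ n hnp)
  congr 1
  cases hk : p.1 with
  | nil => simp [pvShape, ← hp', hk, PySem.Chars.join_nil]
  | cons n k =>
    have hjoin : List.foldl pvStep [] p.1 = PySem.Chars.join (", ").toList (p.1.map String.toList) := by
      rw [hk]
      simp only [List.foldl_cons, List.map_cons]
      have h1 : pvStep [] n = n.toList := by simp [pvStep]
      rw [h1]
      exact pvFold_join k n.toList (hkz n (hk ▸ List.mem_cons_self))
    have hne : List.foldl pvStep [] p.1 ≠ [] := by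
      rw [hk]
      simp only [List.foldl_cons]
      have h1 : pvStep [] n = n.toList := by simp [pvStep]
      rw [h1]
      exact pvFold_ne_nil k n.toList (hkz n (hk ▸ List.mem_cons_self))
    have hk1 : p.1 ≠ [] := by rw [hk]; simp
    rw [← hp', ← hjoin]
    unfold pvShape
    rw [← hk]
    by_cases ht : p.2
    · rw [if_pos ht, if_pos ht, if_neg hne, if_neg hk1]
      simp [List.append_assoc]
    · rw [if_neg ht, if_neg ht]
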